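-- pv_equiv track=rewrite | github.com/kevin199907/AOC | Project/Software/project_Mobilenet_q/mobilenet_model/golden_gen.py | signed_dec2hex_matrix
-- ===== SOURCE A (Python) =====
-- def signed_dec2hex_matrix(input):
--     '''Convert a matrix which data is signed decimal to 8 bits hex with 2's complement'''
--     temp = []
--     bin8 = lambda x : ''.join(reversed( [str((x >> i) & 1) for i in range(8)] ) )
--     for i in input:
--         test =bin8(i)
--         test = int(test,base=2)
--         hex_test = hex(test)[2:].zfill(2)
--         temp.append(hex_test)
--
--     return temp
-- ===== SOURCE B (Python) =====
-- def signed_dec2hex_matrix(input):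
--     '''Convert a matrix which data is signed decimal to 8 bits hex with 2's complement'''
--     return [format(i & 0xFF, '02x') for i in input]
-- ===== Notes on version B (the rewrite author's own statement) =====
-- stated objective: simpler
-- what changed: Replaces A's per-element pipeline (build an 8-character binary string bit by bit, re-parse it with int(.,2), then hex()+zfill) with direct arithmetic: mask the low byte with i & 0xFF and format it as two hex digits.
import Mathlib
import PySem

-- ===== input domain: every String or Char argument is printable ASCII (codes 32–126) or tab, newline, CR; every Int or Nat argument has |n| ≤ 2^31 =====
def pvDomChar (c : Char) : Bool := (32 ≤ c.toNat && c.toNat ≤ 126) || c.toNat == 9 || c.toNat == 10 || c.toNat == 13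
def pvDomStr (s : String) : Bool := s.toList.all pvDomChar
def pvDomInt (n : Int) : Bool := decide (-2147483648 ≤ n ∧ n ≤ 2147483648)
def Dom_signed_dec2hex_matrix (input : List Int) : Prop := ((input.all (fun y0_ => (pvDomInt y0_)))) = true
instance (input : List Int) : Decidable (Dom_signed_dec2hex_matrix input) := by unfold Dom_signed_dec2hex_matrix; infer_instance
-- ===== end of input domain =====

-- B replaces A's per-element build-binary-string/re-parse/hex/zfill pipeline by directly
-- masking the low byte (i & 0xFF) and formatting it as two hex digits (objective: simpler).

-- ===== PORT A =====

-- lowercase hex digit character for 0 ≤ n < 16 (shared digit table of both ports)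
def pvHexDigit (n : Nat) : Char := if n < 10 then Char.ofNat (48 + n) else Char.ofNat (87 + n)

-- bin8 = lambda x: ''.join(reversed([str((x >> i) & 1) for i in range(8)]))
def pvBin8 (x : Int) : String :=
  PySem.Str.join "" (((PySem.List.pyRange 0 8 1).map
      (fun k => PySem.Int.toStr (PySem.Int.band (x >>> k.toNat) 1))).reverse)

-- hex digits of n (no '0x' prefix), exact for n ≥ 0: repeated division by 16, most
-- significant digit first; the first argument is fuel making the division loop structural
def pvHexNat : Nat → Nat → List Char
  | 0, n => [pvHexDigit (n % 16)]
  | fuel+1, n => if n < 16 then [pvHexDigit n] else pvHexNat fuel (n / 16) ++ [pvHexDigit (n % 16)]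

-- hex(t)[2:] — exact for t ≥ 0 (A only ever calls it on 0 ≤ t ≤ 255); fuel t suffices
def pvHexPy (t : Int) : String := String.ofList (pvHexNat t.toNat t.toNat)

def signed_dec2hex_matrix (input : List Int) : List String :=
  input.foldl (fun temp i =>
    let test := pvBin8 i
    -- int(test, base=2): the string is always 8 binary digits here, so the parse never
    -- raises; .getD 0 only totalizes the unreachable ValueError case
    let test2 := (PySem.Int.ofStrBase? test 2).getD 0
    -- hex(test2)[2:].zfill(2)
    let hex_test := PySem.Str.zfill (pvHexPy test2) 2
    temp ++ [hex_test]) []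

-- ===== PORT B =====

-- format(i & 0xFF, '02x'): the masked byte is in [0, 256), so exactly two hex digits
def signed_dec2hex_matrix_alt (input : List Int) : List String :=
  input.map (fun i =>
    let m := (PySem.Int.band i 255).toNat
    String.ofList [pvHexDigit (m / 16), pvHexDigit (m % 16)])

-- ===== PRECONDITION & SPEC =====
def Spec_signed_dec2hex_matrix (input : List Int) (out : List String) : Prop := out = signed_dec2hex_matrix_alt input
instance (input : List Int) (out : List String) : Decidable (Spec_signed_dec2hex_matrix input out) := by unfold Spec_signed_dec2hex_matrix; infer_instance

-- ===== CLAIM (what is proved, stated in full; the proofs are below) =====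
def Claim_equal_signed_dec2hex_matrix : Prop := ∀ (input : List Int), Dom_signed_dec2hex_matrix input → Spec_signed_dec2hex_matrix input (signed_dec2hex_matrix input)

-- ===== LEMMAS AND PROOFS =====

-- the character str(b) of a bit value b
def pvBitChar (b : Nat) : Char := if b = 1 then '1' else '0'

-- the 8 characters A's bin8 produces, expressed by the byte value n = i mod 256
def pvBits (n : Nat) : List Char :=
  [pvBitChar (n / 128 % 2), pvBitChar (n / 64 % 2), pvBitChar (n / 32 % 2),
   pvBitChar (n / 16 % 2), pvBitChar (n / 8 % 2), pvBitChar (n / 4 % 2),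
   pvBitChar (n / 2 % 2), pvBitChar (n % 2)]

theorem pv_band255 (i : Int) : PySem.Int.band i 255 = i % 256 := by
  have hmask : ∀ m : Nat, m &&& 255 = m % 256 := by
    intro m
    have := Nat.and_two_pow_sub_one_eq_mod m 8
    norm_num at this; exact this
  unfold PySem.Int.band
  by_cases h : 0 ≤ i
  · rw [if_pos h, if_pos (show (0:Int) ≤ 255 by norm_num),
      show (255 : Int).toNat = 255 from rfl, hmask]
    omega
  · rw [if_neg h, if_pos (show (0:Int) ≤ 255 by norm_num),
      show (255 : Int).toNat = 255 from rfl, Nat.land_comm 255, hmask]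
    omega

theorem pv_toChars_bit (b : Nat) (hb : b < 2) :
    PySem.Int.toChars ((b : Nat) : Int) = [pvBitChar b] := by
  interval_cases b <;> decide

theorem pv_bin8_toList (i : Int) (n : Nat) (h : i % 256 = (n : Int)) :
    (pvBin8 i).toList = pvBits n := by
  have hr : PySem.List.pyRange 0 8 1 = [0, 1, 2, 3, 4, 5, 6, 7] := by decide
  have hband : ∀ k : Nat, PySem.Int.band (i >>> k) 1 = i / ((2 ^ k : Nat) : Int) % 2 := by
    intro k
    rw [PySem.Int.band_one, PySem.Int.mod_eq_emod_of_pos (by norm_num),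
      Int.shiftRight_eq_div_pow]
  have b7 : PySem.Int.band (i >>> (Int.toNat 7)) 1 = ((n / 128 % 2 : Nat) : Int) := by
    rw [hband, show Int.toNat 7 = 7 from rfl]
    norm_num; omega
  have b6 : PySem.Int.band (i >>> (Int.toNat 6)) 1 = ((n / 64 % 2 : Nat) : Int) := by
    rw [hband, show Int.toNat 6 = 6 from rfl]
    norm_num; omega
  have b5 : PySem.Int.band (i >>> (Int.toNat 5)) 1 = ((n / 32 % 2 : Nat) : Int) := by
    rw [hband, show Int.toNat 5 = 5 from rfl]
    norm_num; omega
  have b4 : PySem.Int.band (i >>> (Int.toNat 4)) 1 = ((n / 16 % 2 : Nat) : Int) := by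
    rw [hband, show Int.toNat 4 = 4 from rfl]
    norm_num; omega
  have b3 : PySem.Int.band (i >>> (Int.toNat 3)) 1 = ((n / 8 % 2 : Nat) : Int) := by
    rw [hband, show Int.toNat 3 = 3 from rfl]
    norm_num; omega
  have b2 : PySem.Int.band (i >>> (Int.toNat 2)) 1 = ((n / 4 % 2 : Nat) : Int) := by
    rw [hband, show Int.toNat 2 = 2 from rfl]
    norm_num; omega
  have b1 : PySem.Int.band (i >>> (Int.toNat 1)) 1 = ((n / 2 % 2 : Nat) : Int) := by
    rw [hband, show Int.toNat 1 = 1 from rfl]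
    norm_num; omega
  have b0 : PySem.Int.band (i >>> (Int.toNat 0)) 1 = ((n % 2 : Nat) : Int) := by
    rw [hband, show Int.toNat 0 = 0 from rfl]
    norm_num; omega
  unfold pvBin8
  rw [PySem.Str.toList_join, hr]
  simp only [List.map_cons, List.map_nil, List.reverse_cons, List.reverse_nil,
    List.nil_append, List.cons_append]
  simp only [Int.shiftRight_natCast_right]
  rw [b7, b6, b5, b4, b3, b2, b1, b0]
  simp only [PySem.Int.toList_toStr, pv_toChars_bit _ (Nat.mod_lt _ (by norm_num)),
    show ("" : String).toList = [] from by decide]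
  simpa [pvBits, List.map] using PySem.Chars.join_nil_singletons (pvBits n)

set_option maxHeartbeats 4000000 in
set_option maxRecDepth 100000 in
theorem pv_key256 : ∀ v : Fin 256,
    PySem.Chars.zfill
      (pvHexNat ((PySem.Int.ofCharsBase? (pvBits v.val) 2).getD 0).toNat
        ((PySem.Int.ofCharsBase? (pvBits v.val) 2).getD 0).toNat) 2
      = [pvHexDigit (v.val / 16), pvHexDigit (v.val % 16)] := by decide

theorem pv_zfill_hex (t : Int) :
    PySem.Str.zfill (pvHexPy t) 2 = String.ofList (PySem.Chars.zfill (pvHexNat t.toNat t.toNat) 2) := by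
  rw [← String.ofList_toList (s := PySem.Str.zfill (pvHexPy t) 2), PySem.Str.toList_zfill]
  unfold pvHexPy
  rw [String.toList_ofList]

theorem pv_elem (i : Int) :
    PySem.Str.zfill (pvHexPy ((PySem.Int.ofStrBase? (pvBin8 i) 2).getD 0)) 2
      = String.ofList [pvHexDigit ((PySem.Int.band i 255).toNat / 16),
          pvHexDigit ((PySem.Int.band i 255).toNat % 16)] := by
  have h0 : (0 : Int) ≤ i % 256 := Int.emod_nonneg i (by norm_num)
  have h1 : i % 256 < 256 := Int.emod_lt_of_pos i (by norm_num)
  have hin : i % 256 = (((i % 256).toNat : Nat) : Int) := by omega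
  set n : Nat := (i % 256).toNat with hn
  have hnlt : n < 256 := by omega
  have hba : PySem.Int.band i 255 = (n : Int) := by rw [pv_band255, hin]
  have hparse : PySem.Int.ofStrBase? (pvBin8 i) 2 = PySem.Int.ofCharsBase? (pvBits n) 2 := by
    rw [show PySem.Int.ofStrBase? (pvBin8 i) 2
        = PySem.Int.ofCharsBase? (pvBin8 i).toList 2 from rfl, pv_bin8_toList i n hin]
  rw [hba, hparse, pv_zfill_hex, Int.toNat_natCast]
  exact congrArg String.ofList (pv_key256 ⟨n, hnlt⟩)

-- ===== VERDICT (by name: the statement is the Claim_ definition above) =====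
theorem signed_dec2hex_matrix_spec : Claim_equal_signed_dec2hex_matrix := by
  intro input _
  show signed_dec2hex_matrix input = signed_dec2hex_matrix_alt input
  unfold signed_dec2hex_matrix signed_dec2hex_matrix_alt
  rw [PySem.List.foldl_append_singleton_eq_map, List.nil_append]
  exact List.map_congr_left (fun i _ => pv_elem i)
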